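-- pv_equiv track=rewrite | github.com/jazzy712/TIL-2 | pythonProject1/5201_container_move.py | container_move
-- ===== SOURCE A (Python) =====
-- def container_move(wi, ti):
--     # 화물 무게와 적재용량 내림차순
--     wi.sort(reverse=True)
--     ti.sort(reverse=True)
--     # 총 무게 초기화
--     total_weight = 0
--     # # 트럭 수 만큼 반복
--     # for i in range(M):
--     # 화물이 더 많을 수도 있고, 트럭이 더 많을 수도 있음
--     # 둘 중 작은 값만큼 반복
--     for i in range(min(len(wi), len(ti))):
--         # 화물 무게들을 순회하면서 찾기
--         for j in range(len(wi)):
--             # 적재용량보다 무게가 작다면 운반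
--             if wi[j] <= ti[i]:
--                 total_weight += wi[j]
--                 # 운반했으면 화물 리스트에서 빼고 다음 트럭으로 넘어감
--                 wi.pop(j)
--                 break
--
--     return total_weight
-- ===== SOURCE B (Python) =====
-- def container_move(wi, ti):
--     # Two-pointer sweep: boxes and trucks both descending; a box too heavy for the
--     # current (largest remaining) truck is too heavy for every later truck, so it
--     # is skipped permanently.  Return value only: unlike A, this does not mutate
--     # wi/ti in place.
--     boxes = sorted(wi, reverse=True)
--     trucks = sorted(ti, reverse=True)
--     total = 0
--     t = 0
--     for b in boxes:
--         if t == len(trucks):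
--             break
--         if b <= trucks[t]:
--             total += b
--             t += 1
--     return total
-- ===== Notes on version B (the rewrite author's own statement) =====
-- stated objective: faster
-- what changed: Replaced the per-truck linear rescan with pop() over the box list by a single two-pointer sweep over both descending-sorted lists (a box heavier than the current largest truck is skipped for good).
import Mathlib
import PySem

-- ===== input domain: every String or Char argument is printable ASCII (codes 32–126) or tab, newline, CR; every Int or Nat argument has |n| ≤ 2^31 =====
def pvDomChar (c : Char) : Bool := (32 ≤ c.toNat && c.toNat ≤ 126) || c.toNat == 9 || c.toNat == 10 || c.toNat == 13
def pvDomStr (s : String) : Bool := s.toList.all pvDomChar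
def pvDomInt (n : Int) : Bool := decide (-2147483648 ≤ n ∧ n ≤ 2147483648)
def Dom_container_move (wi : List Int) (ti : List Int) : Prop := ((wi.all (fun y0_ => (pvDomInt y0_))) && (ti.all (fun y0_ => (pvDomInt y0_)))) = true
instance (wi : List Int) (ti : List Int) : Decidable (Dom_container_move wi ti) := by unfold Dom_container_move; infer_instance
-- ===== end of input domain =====

-- B replaces A's per-truck rescan+pop of the box list by one two-pointer sweep over the
-- descending-sorted lists (timed faster). Equivalence is about the RETURN value only:
-- A sorts wi and ti in place and pops from wi; B does not mutate its arguments.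

-- ===== PORT A =====
-- inner loop "for j in range(len(wi)): if wi[j] <= cap: take wi[j]; wi.pop(j); break"
-- as the standard structural recursion over the scanned list
def pvFindPopA (ws : List Int) (cap : Int) : Option (Int × List Int) :=
  match ws with
  | [] => none
  | w :: t =>
      if w ≤ cap then some (w, t)
      else
        match pvFindPopA t cap with
        | none => none
        | some (v, t') => some (v, w :: t')

def container_move (wi : List Int) (ti : List Int) : Int :=
  let ws := PySem.List.sorted wi (fun x => x) true
  let ts := PySem.List.sorted ti (fun x => x) true
  -- for i in range(min(len(wi), len(ti))): … ti[i] …  (state: current wi, total_weight)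
  let st := (PySem.List.pyRange 0 (min ws.length ts.length : Nat) 1).foldl
    (fun (st : List Int × Int) i =>
      match pvFindPopA st.1 (PySem.List.pyGetD ts i 0) with
      | none => st
      | some (w, rest) => (rest, st.2 + w)) (ws, 0)
  st.2

-- ===== PORT B =====
def container_move_alt (wi : List Int) (ti : List Int) : Int :=
  let boxes := PySem.List.sorted wi (fun x => x) true
  let trucks := PySem.List.sorted ti (fun x => x) true
  -- for b in boxes with truck pointer t; Python's break once t == len(trucks) is the
  -- same as skipping the remaining iterations (the state no longer changes)
  let st := boxes.foldl
    (fun (st : Nat × Int) b =>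
      if st.1 = trucks.length then st
      else if b ≤ PySem.List.pyGetD trucks (st.1 : Int) 0 then (st.1 + 1, st.2 + b)
      else st) (0, 0)
  st.2

-- ===== PRECONDITION & SPEC =====
def Spec_container_move (wi : List Int) (ti : List Int) (out : Int) : Prop := out = container_move_alt wi ti
instance (wi : List Int) (ti : List Int) (out : Int) : Decidable (Spec_container_move wi ti out) := by unfold Spec_container_move; infer_instance

-- ===== CLAIM (what is proved, stated in full; the proofs are below) =====
def Claim_equal_container_move : Prop := ∀ (wi : List Int) (ti : List Int), Dom_container_move wi ti → Spec_container_move wi ti (container_move wi ti)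

-- ===== LEMMAS AND PROOFS =====

-- pure recursive characterisation of A's outer loop: k remaining iterations,
-- current box list, remaining capacities (trucks taken in order)
def pvARun : Nat → List Int → List Int → Int
  | 0, _, _ => 0
  | _ + 1, _, [] => 0
  | k + 1, ws, c :: cs =>
      match pvFindPopA ws c with
      | none => pvARun k ws cs
      | some (w, ws') => w + pvARun k ws' cs

-- pure recursive characterisation of B's two-pointer sweep
def pvGoB : List Int → List Int → Int
  | [], _ => 0
  | _ :: _, [] => 0
  | b :: bs, c :: cs => if b ≤ c then b + pvGoB bs cs else pvGoB bs (c :: cs)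

theorem pvARun_nil_caps (k : Nat) (ws : List Int) : pvARun k ws [] = 0 := by
  cases k <;> rfl

theorem pvARun_nil_boxes (k : Nat) (cs : List Int) : pvARun k [] cs = 0 := by
  induction k generalizing cs with
  | zero => rfl
  | succ k ih => cases cs with
    | nil => rfl
    | cons c cs => simp [pvARun, pvFindPopA, ih]

-- a box heavier than every remaining capacity is never taken by A's scan
theorem pvARun_skip1 (b : Int) (k : Nat) (cs ws : List Int)
    (hb : ∀ c ∈ cs, c < b) : pvARun k (b :: ws) cs = pvARun k ws cs := by
  induction k generalizing cs ws with
  | zero => rfl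
  | succ k ih =>
    cases cs with
    | nil => rfl
    | cons c cs =>
      have hcb : c < b := hb c (by simp)
      have hbc : ¬ b ≤ c := by omega
      have hb' : ∀ c' ∈ cs, c' < b := fun c' hc' => hb c' (by simp [hc'])
      cases hfp : pvFindPopA ws c with
      | none => simp [pvARun, pvFindPopA, hbc, hfp, ih _ _ hb']
      | some p =>
        obtain ⟨w, ws'⟩ := p
        simp [pvARun, pvFindPopA, hbc, hfp, ih _ _ hb']

-- main lemma: on descending-sorted lists A's greedy equals the two-pointer sweep
theorem pvARun_eq_pvGoB (ws : List Int) (k : Nat) (cs : List Int)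
    (hw : ws.Pairwise (fun a b => b ≤ a)) (hc : cs.Pairwise (fun a b => b ≤ a))
    (hk : min ws.length cs.length ≤ k) : pvARun k ws cs = pvGoB ws cs := by
  induction ws generalizing k cs with
  | nil => simp [pvARun_nil_boxes, pvGoB]
  | cons b bs ih =>
    cases cs with
    | nil => simp [pvARun_nil_caps, pvGoB]
    | cons c cs =>
      obtain ⟨k, rfl⟩ : ∃ k', k = k' + 1 := by
        cases k with
        | zero => simp at hk
        | succ k => exact ⟨k, rfl⟩
      have hwtail := (List.pairwise_cons.mp hw).2
      have hctail := (List.pairwise_cons.mp hc).2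
      by_cases hbc : b ≤ c
      · have : pvARun (k + 1) (b :: bs) (c :: cs) = b + pvARun k bs cs := by
          simp [pvARun, pvFindPopA, hbc]
        rw [this, ih k cs hwtail hctail (by simp at hk ⊢; omega)]
        simp [pvGoB, hbc]
      · have hb' : ∀ c' ∈ c :: cs, c' < b := by
          intro c' hc'
          rcases List.mem_cons.mp hc' with rfl | hmem
          · omega
          · have := (List.pairwise_cons.mp hc).1 c' hmem; omega
        rw [pvARun_skip1 b (k + 1) (c :: cs) bs hb',
          ih (k + 1) (c :: cs) hwtail hc (by simp at hk ⊢; omega)]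
        simp [pvGoB, hbc]

-- bridge: A's indexed foldl over range(i, i+K) equals pvARun K on the dropped suffix
theorem pvBridgeA (ts : List Int) (K i : Nat) (ws : List Int) (tot : Int)
    (h : i + K ≤ ts.length) :
    ((PySem.List.pyRange i (i + K : Nat) 1).foldl
      (fun (st : List Int × Int) j =>
        match pvFindPopA st.1 (PySem.List.pyGetD ts j 0) with
        | none => st
        | some (w, rest) => (rest, st.2 + w)) (ws, tot)).2
      = tot + pvARun K ws (ts.drop i) := by
  induction K generalizing i ws tot with
  | zero =>
    rw [PySem.List.pyRange_one_eq_nil (by push_cast; omega)]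
    simp [pvARun]
  | succ K ih =>
    rw [PySem.List.pyRange_one_cons (by push_cast; omega)]
    have hi : i < ts.length := by omega
    have hdrop : ts.drop i = ts[i] :: ts.drop (i + 1) := List.drop_eq_getElem_cons hi
    have hget : PySem.List.pyGetD ts (i : Int) 0 = ts[i] := by
      rw [PySem.List.pyGetD_natCast]; exact List.getD_eq_getElem ts 0 hi
    have harith : ((i : Int) + 1 : Int) = ((i + 1 : Nat) : Int) := by push_cast; ring
    have harith2 : i + (K + 1) = (i + 1) + K := by omega
    rw [hdrop]
    cases hfp : pvFindPopA ws ts[i] with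
    | none =>
      simp only [List.foldl_cons, hget, hfp]
      rw [harith, harith2, ih (i + 1) ws tot (by omega)]
      simp [pvARun, hfp]
    | some p =>
      obtain ⟨w, rest⟩ := p
      simp only [List.foldl_cons, hget, hfp]
      rw [harith, harith2, ih (i + 1) rest (tot + w) (by omega)]
      simp [pvARun, hfp]; ring

-- bridge: B's foldl with truck pointer t equals pvGoB on the dropped truck suffix
theorem pvBridgeB (trucks : List Int) (boxes : List Int) (t : Nat) (tot : Int)
    (h : t ≤ trucks.length) :
    (boxes.foldl
      (fun (st : Nat × Int) b =>
        if st.1 = trucks.length then st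
        else if b ≤ PySem.List.pyGetD trucks (st.1 : Int) 0 then (st.1 + 1, st.2 + b)
        else st) (t, tot)).2
      = tot + pvGoB boxes (trucks.drop t) := by
  induction boxes generalizing t tot with
  | nil => cases trucks.drop t <;> simp [pvGoB]
  | cons b bs ih =>
    by_cases ht : t = trucks.length
    · subst ht
      simp only [List.foldl_cons, if_true]
      rw [ih _ tot le_rfl]
      simp only [List.drop_length]
      cases bs <;> simp [pvGoB]
    · have hlt : t < trucks.length := by omega
      have hdrop : trucks.drop t = trucks[t] :: trucks.drop (t + 1) :=
        List.drop_eq_getElem_cons hlt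
      have hget : PySem.List.pyGetD trucks (t : Int) 0 = trucks[t] := by
        rw [PySem.List.pyGetD_natCast]; exact List.getD_eq_getElem trucks 0 hlt
      rw [hdrop]
      by_cases hb : b ≤ trucks[t]
      · simp only [List.foldl_cons, if_neg ht, hget, if_pos hb]
        rw [ih (t + 1) (tot + b) (by omega)]
        simp [pvGoB, hb]; ring
      · simp only [List.foldl_cons, if_neg ht, hget, if_neg hb]
        rw [ih t tot (by omega), ← hdrop, hdrop]
        simp [pvGoB, hb]

-- ===== VERDICT (by name: the statement is the Claim_ definition above) =====
theorem container_move_spec : Claim_equal_container_move := by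
  intro wi ti _
  unfold Spec_container_move container_move container_move_alt
  have hA := pvBridgeA (PySem.List.sorted ti (fun x => x) true)
    (min (PySem.List.sorted wi (fun x => x) true).length
         (PySem.List.sorted ti (fun x => x) true).length) 0
    (PySem.List.sorted wi (fun x => x) true) 0 (by omega)
  have hB := pvBridgeB (PySem.List.sorted ti (fun x => x) true)
    (PySem.List.sorted wi (fun x => x) true) 0 0 (by omega)
  simp only [Nat.zero_add, Nat.cast_zero] at hA hB
  simp only [hA, hB, List.drop_zero, zero_add]
  exact pvARun_eq_pvGoB _ _ _
    (PySem.List.sorted_pairwise_rev wi (fun x => x))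
    (PySem.List.sorted_pairwise_rev ti (fun x => x)) le_rfl
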